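-- pv_equiv track=rewrite | github.com/DavidOWilliams/Materials-design | src/surface_function_model.py | _function_to_candidate_ids
-- ===== SOURCE A (Python) =====
-- from collections.abc import Mapping, Sequence
--
-- def _function_to_candidate_ids(candidate_to_functions: Mapping[str, Sequence[str]]) -> dict[str, list[str]]:
--     output: dict[str, list[str]] = {}
--     for candidate_id, function_ids in candidate_to_functions.items():
--         for function_id in function_ids:
--             output.setdefault(function_id, []).append(candidate_id)
--     return {
--         function_id: sorted(candidate_ids)
--         for function_id, candidate_ids in sorted(output.items())
--     }
-- ===== SOURCE B (Python) =====
-- from itertools import groupby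
--
--
-- def _function_to_candidate_ids(candidate_to_functions):
--     pairs = sorted(
--         (function_id, candidate_id)
--         for candidate_id, function_ids in candidate_to_functions.items()
--         for function_id in function_ids
--     )
--     return {
--         function_id: [candidate_id for _, candidate_id in group]
--         for function_id, group in groupby(pairs, key=lambda pair: pair[0])
--     }
-- ===== Notes on version B (the rewrite author's own statement) =====
-- stated objective: alternative
-- what changed: Replaces the dict-of-buckets build (setdefault/append per item, then sort the keys and each bucket separately) by flattening the mapping into (function_id, candidate_id) pairs, sorting that pair list once lexicographically, and grouping consecutive equal function_ids with itertools.groupby.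
import Mathlib
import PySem

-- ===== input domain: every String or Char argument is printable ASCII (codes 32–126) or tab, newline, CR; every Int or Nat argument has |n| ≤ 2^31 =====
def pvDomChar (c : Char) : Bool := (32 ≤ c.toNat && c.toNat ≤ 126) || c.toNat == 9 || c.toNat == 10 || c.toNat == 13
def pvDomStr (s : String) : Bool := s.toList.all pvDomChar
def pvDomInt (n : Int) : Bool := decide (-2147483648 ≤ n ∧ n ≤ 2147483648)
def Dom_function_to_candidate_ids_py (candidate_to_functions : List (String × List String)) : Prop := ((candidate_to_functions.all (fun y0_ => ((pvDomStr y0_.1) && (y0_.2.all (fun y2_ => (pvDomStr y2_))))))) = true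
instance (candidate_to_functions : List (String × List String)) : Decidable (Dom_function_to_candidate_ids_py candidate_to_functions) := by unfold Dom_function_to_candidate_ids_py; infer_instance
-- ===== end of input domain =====

-- B replaces A's dict-of-buckets build (setdefault/append, then sort keys and each bucket) by
-- flattening to (function_id, candidate_id) pairs, sorting them once, and grouping consecutive
-- equal function ids (itertools.groupby); same return value, alternative algorithm of similar cost.


-- ===== PORT A =====
-- output.setdefault(function_id, []).append(candidate_id) is d.modify function_id [] (· ++ [cid]).
-- sorted(output.items()) sorts pairs; dict keys are unique, so Python's tuple order is the key order.
def function_to_candidate_ids_py (candidate_to_functions : List (String × List String)) : List (String × List String) :=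
  let output : PySem.Dict String (List String) :=
    candidate_to_functions.foldl
      (fun d p => p.2.foldl (fun d function_id => d.modify function_id [] (fun l => l ++ [p.1])) d)
      PySem.Dict.empty
  (PySem.List.sorted output.items (fun q => q.1)).map
    (fun q => (q.1, PySem.List.sorted q.2 (fun c => c)))

-- ===== PORT B =====
-- itertools.groupby on a list, keyed by the first component, each group materialised as a list.
def pvGroupPairs : List (String × String) → List (String × List String)
  | [] => []
  | (f, c) :: rest =>
    (f, c :: (rest.takeWhile (fun q => q.1 == f)).map (fun q => q.2)) ::
      pvGroupPairs (rest.dropWhile (fun q => q.1 == f))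
termination_by l => l.length
decreasing_by
  simpa using Nat.lt_succ_of_le (List.length_dropWhile_le (fun q => q.1 == f) rest)

def function_to_candidate_ids_py_alt (candidate_to_functions : List (String × List String)) : List (String × List String) :=
  let pairs : List (String × String) :=
    candidate_to_functions.flatMap (fun p => p.2.map (fun function_id => (function_id, p.1)))
  pvGroupPairs (PySem.List.sorted2 pairs (fun q => q.1) (fun q => q.2))

-- ===== PRECONDITION & SPEC =====
def Spec_function_to_candidate_ids_py (candidate_to_functions : List (String × List String)) (out : List (String × List String)) : Prop := out = function_to_candidate_ids_py_alt candidate_to_functions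
instance (candidate_to_functions : List (String × List String)) (out : List (String × List String)) : Decidable (Spec_function_to_candidate_ids_py candidate_to_functions out) := by unfold Spec_function_to_candidate_ids_py; infer_instance

-- ===== CLAIM (what is proved, stated in full; the proofs are below) =====
def Claim_equal_function_to_candidate_ids_py : Prop := ∀ (candidate_to_functions : List (String × List String)), Dom_function_to_candidate_ids_py candidate_to_functions → Spec_function_to_candidate_ids_py candidate_to_functions (function_to_candidate_ids_py candidate_to_functions)

-- ===== LEMMAS AND PROOFS =====

-- Python's tuple order on (String, String) pairs: non-strict lexicographic.
def pvLexLe (p q : String × String) : Prop := p.1 < q.1 ∨ (p.1 = q.1 ∧ p.2 ≤ q.2)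

-- the comparator sorted2 uses (reverse = false)
def pvBefore (a b : String × String) : Bool :=
  decide (a.1 < b.1) || (!decide (b.1 < a.1) && decide (a.2 < b.2))

theorem pvLexLe_trans {p q r : String × String} (h1 : pvLexLe p q) (h2 : pvLexLe q r) : pvLexLe p r := by
  rcases h1 with h1 | ⟨e1, l1⟩ <;> rcases h2 with h2 | ⟨e2, l2⟩
  · exact Or.inl (lt_trans h1 h2)
  · exact Or.inl (e2 ▸ h1)
  · exact Or.inl (e1 ▸ h2)
  · exact Or.inr ⟨e1.trans e2, le_trans l1 l2⟩

theorem pvBefore_true {a b : String × String} (h : pvBefore a b = true) : pvLexLe a b := by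
  unfold pvBefore at h
  simp only [Bool.or_eq_true, Bool.and_eq_true, Bool.not_eq_true', decide_eq_true_eq,
    decide_eq_false_iff_not] at h
  rcases h with h | ⟨h1, h2⟩
  · exact Or.inl h
  · rcases lt_or_ge a.1 b.1 with hl | hl
    · exact Or.inl hl
    · exact Or.inr ⟨le_antisymm (not_lt.mp h1) hl, le_of_lt h2⟩

theorem pvBefore_false {a b : String × String} (h : pvBefore a b = false) : pvLexLe b a := by
  unfold pvBefore at h
  simp only [Bool.or_eq_false_iff, Bool.and_eq_false_iff, Bool.not_eq_false',
    decide_eq_true_eq, decide_eq_false_iff_not] at h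
  rcases h with ⟨h1, h2⟩
  rcases h2 with h2 | h2
  · exact Or.inl h2
  · rcases lt_or_ge b.1 a.1 with hl | hl
    · exact Or.inl hl
    · exact Or.inr ⟨le_antisymm (not_lt.mp h1) hl, not_lt.mp h2⟩

theorem insertBy_pvLex (x : String × String) (ys : List (String × String))
    (h : ys.Pairwise pvLexLe) : (PySem.List.insertBy pvBefore x ys).Pairwise pvLexLe := by
  induction ys with
  | nil => simp [PySem.List.insertBy]
  | cons y ys ih =>
    rcases List.pairwise_cons.mp h with ⟨hy, hys⟩
    rw [PySem.List.insertBy]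
    by_cases hb : pvBefore x y = true
    · rw [if_pos hb]
      refine List.pairwise_cons.mpr ⟨?_, h⟩
      intro z hz
      rcases List.mem_cons.mp hz with rfl | hz
      · exact pvBefore_true hb
      · exact pvLexLe_trans (pvBefore_true hb) (hy z hz)
    · rw [if_neg hb]
      refine List.pairwise_cons.mpr ⟨?_, ih hys⟩
      intro z hz
      rcases (PySem.List.mem_insertBy pvBefore x z ys).mp hz with rfl | hz
      · exact pvBefore_false (Bool.eq_false_iff.mpr hb)
      · exact hy z hz

theorem sorted2_pairwise_pvLex (xs : List (String × String)) :
    (PySem.List.sorted2 xs (fun q => q.1) (fun q => q.2)).Pairwise pvLexLe := by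
  have hrw : PySem.List.sorted2 xs (fun q => q.1) (fun q => q.2) =
      xs.foldl (fun acc x => PySem.List.insertBy pvBefore x acc) [] := rfl
  rw [hrw]; clear hrw
  suffices h : ∀ (acc : List (String × String)), acc.Pairwise pvLexLe →
      (xs.foldl (fun acc x => PySem.List.insertBy pvBefore x acc) acc).Pairwise pvLexLe from
    h [] (by simp)
  induction xs with
  | nil => intro acc hacc; simpa using hacc
  | cons x xs ih => intro acc hacc; exact ih (PySem.List.insertBy pvBefore x acc) (insertBy_pvLex x acc hacc)

-- PySem.Set.ofList keeps first occurrences in order: it is a sublist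
theorem ofList_sublist {α : Type} [BEq α] [LawfulBEq α] (l : List α) :
    (PySem.Set.ofList l).Sublist l := by
  induction l with
  | nil => simp [PySem.Set.ofList_nil]
  | cons x l ih =>
    rw [PySem.Set.ofList_cons]
    exact List.Sublist.cons₂ x (List.Sublist.trans List.filter_sublist ih)

theorem ofList_pairwise_lt (l : List String) (h : l.Pairwise (· ≤ ·)) :
    (PySem.Set.ofList l).Pairwise (· < ·) := by
  have hle : (PySem.Set.ofList l).Pairwise (· ≤ ·) := h.sublist (ofList_sublist l)
  have hnd : (PySem.Set.ofList l).Nodup := PySem.Set.nodup_ofList l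
  exact (hle.and hnd).imp (fun h => lt_of_le_of_ne h.1 h.2)

theorem pvHeadDropWhileFalse {α : Type} (p : α → Bool) (l l' : List α) (a : α)
    (h : l.dropWhile p = a :: l') : p a = false := by
  have hne : l.dropWhile p ≠ [] := h ▸ List.cons_ne_nil a l'
  have h2 := List.head_dropWhile_not p hne
  simp only [h, List.head_cons] at h2
  exact h2

theorem pvLexLe_fst_le {a b : String × String} (h : pvLexLe a b) : a.1 ≤ b.1 := by
  rcases h with h | ⟨h, _⟩
  · exact le_of_lt h
  · exact le_of_eq h

theorem discard_ofList_group (a : String) :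
    ∀ (l : List String), (∀ x ∈ l, x = a) → ∀ (m : List String), a ∉ m →
      PySem.Set.discard (PySem.Set.ofList (l ++ m)) a = PySem.Set.ofList m := by
  intro l
  induction l with
  | nil =>
    intro _ m hm
    simp only [List.nil_append, PySem.Set.discard]
    exact List.filter_eq_self.mpr (fun x hx => by
      have hxm : x ∈ m := (PySem.Set.mem_ofList m x).mp hx
      have hne : x ≠ a := fun e => hm (e ▸ hxm)
      simp [hne])
  | cons x l ih =>
    intro hl m hm
    have hx : x = a := hl x List.mem_cons_self
    subst hx
    rw [List.cons_append, PySem.Set.ofList_cons]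
    simp only [PySem.Set.discard, List.filter_cons]
    rw [if_neg (by simp), List.filter_filter]
    have : ∀ (s : List String), List.filter (fun y => !y == x && !y == x) s =
        List.filter (fun y => !y == x) s :=
      fun s => List.filter_congr (fun y _ => by cases y == x <;> rfl)
    rw [this]
    exact ih (fun y hy => hl y (List.mem_cons_of_mem _ hy)) m hm

-- ofList of "a, then a block of copies of a, then keys all different from a"
theorem ofList_group (a : String) (l m : List String) (hl : ∀ x ∈ l, x = a) (hm : a ∉ m) :
    PySem.Set.ofList (a :: (l ++ m)) = a :: PySem.Set.ofList m := by
  rw [PySem.Set.ofList_cons, discard_ofList_group a l hl m hm]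

-- the grouping loop on a pvLexLe-sorted pair list, characterised by key-dedup and filter
theorem groupPairs_eq : ∀ (S : List (String × String)), S.Pairwise pvLexLe →
    pvGroupPairs S = (PySem.Set.ofList (S.map (fun q => q.1))).map
      (fun k => (k, (S.filter (fun q => q.1 == k)).map (fun q => q.2))) := by
  intro S
  induction S using pvGroupPairs.induct with
  | case1 => intro _; simp [pvGroupPairs, PySem.Set.ofList_nil]
  | case2 f c rest ih =>
    intro h
    rcases List.pairwise_cons.mp h with ⟨hfc, hrest⟩
    set t := rest.takeWhile (fun q => q.1 == f) with ht
    set d := rest.dropWhile (fun q => q.1 == f) with hd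
    have htd : t ++ d = rest := List.takeWhile_append_dropWhile
    have ht1 : ∀ q ∈ t, q.1 = f := fun q hq => by
      have := List.mem_takeWhile_imp hq
      exact eq_of_beq this
    have hdsub : d.Sublist rest := List.dropWhile_sublist _
    have hdpair : d.Pairwise pvLexLe := hrest.sublist hdsub
    have hd1 : ∀ q ∈ d, f < q.1 := by
      intro q hq
      cases hde : d with
      | nil => rw [hde] at hq; simp at hq
      | cons q0 d' =>
        have hq0 : (q0.1 == f) = false :=
          pvHeadDropWhileFalse (fun q => q.1 == f) rest d' q0 (hd.symm.trans hde)
        have hq0' : q0.1 ≠ f := by simpa using hq0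
        have hq0r : q0 ∈ rest := hdsub.mem (by rw [hde]; exact List.mem_cons_self)
        have hfq0 : f < q0.1 := by
          rcases hfc q0 hq0r with hlt | ⟨he, _⟩
          · exact hlt
          · exact absurd he.symm hq0'
        rw [hde] at hq
        rcases List.mem_cons.mp hq with rfl | hq'
        · exact hfq0
        · have hpw := (hde ▸ hdpair)
          have := (List.pairwise_cons.mp hpw).1 q hq'
          exact lt_of_lt_of_le hfq0 (pvLexLe_fst_le this)
    have hdne : ∀ x ∈ d.map (fun q => q.1), x ≠ f :=
      fun x hx => by
        rcases List.mem_map.mp hx with ⟨q, hq, rfl⟩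
        exact ne_of_gt (hd1 q hq)
    -- key list
    have hkeys : PySem.Set.ofList (((f, c) :: rest).map (fun q => q.1)) =
        f :: PySem.Set.ofList (d.map (fun q => q.1)) := by
      have : ((f, c) :: rest).map (fun q => q.1) =
          f :: (t.map (fun q => q.1) ++ d.map (fun q => q.1)) := by
        rw [List.map_cons, ← htd, List.map_append]
      rw [this]
      exact ofList_group f _ _
        (fun x hx => by rcases List.mem_map.mp hx with ⟨q, hq, rfl⟩; exact ht1 q hq)
        (fun hmem => (hdne f hmem) rfl)
    -- bucket at f
    have hbf : (((f, c) :: rest).filter (fun q => q.1 == f)).map (fun q => q.2) =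
        c :: t.map (fun q => q.2) := by
      rw [← htd, List.filter_cons, if_pos (by simp), List.filter_append]
      rw [List.filter_eq_self.mpr (fun q hq => by simp [ht1 q hq]),
        List.filter_eq_nil_iff.mpr (fun q hq => by simp [ne_of_gt (hd1 q hq)]),
        List.append_nil, List.map_cons]
    -- buckets at later keys
    have hbk : ∀ k ∈ PySem.Set.ofList (d.map (fun q => q.1)),
        ((f, c) :: rest).filter (fun q => q.1 == k) = d.filter (fun q => q.1 == k) := by
      intro k hk
      have hkmem : k ∈ d.map (fun q => q.1) := (PySem.Set.mem_ofList _ _).mp hk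
      have hkf : f ≠ k := fun e => hdne k hkmem e.symm
      rw [← htd, List.filter_cons, if_neg (by simp [hkf]), List.filter_append,
        List.filter_eq_nil_iff.mpr (fun q hq => by
          simp only [beq_iff_eq]
          exact (ht1 q hq) ▸ hkf), List.nil_append]
    -- put the pieces together
    rw [pvGroupPairs, hkeys, List.map_cons, hbf, ih hdpair]
    congr 1
    exact (List.map_congr_left (fun k hk => by rw [hbk k hk])).symm

-- A's nested bucket-building loop is the flat loop over the (function_id, candidate_id) pairs
theorem foldA_flat : ∀ (ctf : List (String × List String)) (d : PySem.Dict String (List String)),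
    ctf.foldl (fun d p => p.2.foldl (fun d fid => d.modify fid [] (fun l => l ++ [p.1])) d) d =
      (ctf.flatMap (fun p => p.2.map (fun fid => (fid, p.1)))).foldl
        (fun d q => d.modify q.1 [] (fun l => l ++ [q.2])) d := by
  intro ctf
  induction ctf with
  | nil => intro d; rfl
  | cons p ctf ih =>
    intro d
    rw [List.flatMap_cons, List.foldl_append, List.foldl_cons, ih]
    congr 1
    rw [List.foldl_map]

theorem main_eq (ctf : List (String × List String)) :
    function_to_candidate_ids_py ctf = function_to_candidate_ids_py_alt ctf := by
  have hSperm : (PySem.List.sorted2 (ctf.flatMap (fun p => p.2.map (fun fid => (fid, p.1))))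
      (fun q => q.1) (fun q => q.2)).Perm
      (ctf.flatMap (fun p => p.2.map (fun fid => (fid, p.1)))) :=
    PySem.List.sorted2_perm _ _ _ false
  have hSpair := sorted2_pairwise_pvLex (ctf.flatMap (fun p => p.2.map (fun fid => (fid, p.1))))
  set pairs := ctf.flatMap (fun p => p.2.map (fun fid => (fid, p.1))) with hpairs
  set S := PySem.List.sorted2 pairs (fun q => q.1) (fun q => q.2) with hS
  set K := PySem.Set.ofList (pairs.map (fun q => q.1)) with hK
  set bucket := fun k => (pairs.filter (fun q => q.1 == k)).map (fun q => q.2) with hbucketdef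
  -- ===== the A side =====
  set d0 := pairs.foldl (fun d q => d.modify q.1 [] (fun l => l ++ [q.2])) PySem.Dict.empty with hd0
  have hnodup : d0.keys.Nodup := by
    rw [hd0]
    exact PySem.Dict.nodup_keys_foldl_modify_key pairs (fun q => q.1) []
      (fun _ q => fun l => l ++ [q.2]) PySem.Dict.empty
      (by rw [PySem.Dict.keys_empty]; exact List.nodup_nil)
  have hkeys : d0.keys = K := by
    rw [hd0, hK]
    have := PySem.Dict.keys_foldl_modify_key pairs (fun q => q.1) []
      (fun _ q => fun l => l ++ [q.2]) PySem.Dict.empty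
    rw [PySem.Dict.keys_empty] at this
    rw [this, PySem.Set.update_nil_left]
  have hgetD : ∀ k, d0.getD k [] = bucket k := by
    intro k
    rw [hd0, PySem.Dict.getD_foldl_modify_append pairs PySem.Dict.empty k,
      PySem.Dict.getD_empty, List.nil_append]
  have hitems : d0.items = K.map (fun k => (k, bucket k)) := by
    rw [PySem.Dict.items_eq_map_keys d0 hnodup [], hkeys]
    exact List.map_congr_left (fun k _ => by rw [hgetD k])
  have hsorted : PySem.List.sorted d0.items (fun q => q.1) =
      (PySem.List.sorted K (fun k => k)).map (fun k => (k, bucket k)) := by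
    apply PySem.List.sorted_eq_of_perm_of_pairwise_lt
    · rw [hitems]
      exact (PySem.List.sorted_perm K (fun k => k) false).map _
    · apply List.pairwise_map.mpr
      exact hK ▸ PySem.List.sorted_ofList_pairwise_lt (pairs.map (fun q => q.1))
  have hA : function_to_candidate_ids_py ctf =
      (PySem.List.sorted K (fun k => k)).map
        (fun k => (k, PySem.List.sorted (bucket k) (fun c => c))) := by
    show (PySem.List.sorted
        (ctf.foldl (fun d p => p.2.foldl
          (fun d fid => d.modify fid [] (fun l => l ++ [p.1])) d) PySem.Dict.empty).items
        (fun q => q.1)).map (fun q => (q.1, PySem.List.sorted q.2 (fun c => c))) = _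
    rw [foldA_flat, ← hpairs, ← hd0, hsorted, List.map_map]
    rfl
  -- ===== the B side =====
  have hB : function_to_candidate_ids_py_alt ctf =
      (PySem.Set.ofList (S.map (fun q => q.1))).map
        (fun k => (k, (S.filter (fun q => q.1 == k)).map (fun q => q.2))) := by
    show pvGroupPairs S = _
    exact groupPairs_eq S hSpair
  have hKS : PySem.Set.ofList (S.map (fun q => q.1)) = PySem.List.sorted K (fun k => k) := by
    symm
    apply PySem.List.sorted_eq_of_perm_of_pairwise_lt
    · apply (List.perm_ext_iff_of_nodup (PySem.Set.nodup_ofList _)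
        (hK ▸ PySem.Set.nodup_ofList _)).mpr
      intro x
      rw [PySem.Set.mem_ofList, hK, PySem.Set.mem_ofList, List.mem_map, List.mem_map]
      constructor
      · rintro ⟨q, hq, rfl⟩; exact ⟨q, hSperm.mem_iff.mp hq, rfl⟩
      · rintro ⟨q, hq, rfl⟩; exact ⟨q, hSperm.mem_iff.mpr hq, rfl⟩
    · exact ofList_pairwise_lt _
        (List.pairwise_map.mpr (hSpair.imp (fun h => pvLexLe_fst_le h)))
  have hbucket : ∀ k, (S.filter (fun q => q.1 == k)).map (fun q => q.2) =
      PySem.List.sorted (bucket k) (fun c => c) := by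
    intro k
    symm
    apply PySem.List.sorted_id_eq_of_perm_of_pairwise
    · exact (hSperm.filter _).map _
    · apply List.pairwise_map.mpr
      refine List.Pairwise.imp_of_mem ?_ (hSpair.filter _)
      intro a b ha hb hab
      have ha1 : a.1 = k := by simpa using List.of_mem_filter ha
      have hb1 : b.1 = k := by simpa using List.of_mem_filter hb
      rcases hab with hlt | ⟨_, hle⟩
      · rw [ha1, hb1] at hlt; exact absurd hlt (lt_irrefl k)
      · exact hle
  rw [hA, hB, hKS]
  exact (List.map_congr_left (fun k _ => by rw [hbucket k])).symm

-- ===== VERDICT (by name: the statement is the Claim_ definition above) =====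
theorem function_to_candidate_ids_py_spec : Claim_equal_function_to_candidate_ids_py := by
  intro ctf _
  exact main_eq ctf
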